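-- pv_equiv track=rewrite | github.com/CamMacFarlane/SHA3 | DataManipulationUtils.py | myEndiannessSwap
-- ===== SOURCE A (Python) =====
-- def chunkList(myList, chunkSize):
--     chunks = []
--     for i in range(0, len(myList), chunkSize):
--         chunks = chunks + [myList[i:i+chunkSize]]
--     return chunks
--
-- def myEndiannessSwap(myBinList):
--     chunks = chunkList(myBinList,8)
--     ret = []
--     numChunks = len(chunks)
--     old = 0
--
--     for chunk in chunks:
--         ret = ret + chunk[::-1]
--     return ret
-- ===== SOURCE B (Python) =====
-- def myEndiannessSwap(myBinList):
--     n = len(myBinList)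
--     out = []
--     for i in range(n):
--         start = (i // 8) * 8
--         blockLen = min(8, n - start)
--         out.append(myBinList[start + blockLen - 1 - (i - start)])
--     return out
-- ===== Notes on version B (the rewrite author's own statement) =====
-- stated objective: faster
-- what changed: Replaces building a chunk list with repeated quadratic list concatenation (chunks = chunks + [...]; ret = ret + chunk[::-1]) by one flat pass over the indices, computing each output element's source position by index arithmetic.
import Mathlib
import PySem

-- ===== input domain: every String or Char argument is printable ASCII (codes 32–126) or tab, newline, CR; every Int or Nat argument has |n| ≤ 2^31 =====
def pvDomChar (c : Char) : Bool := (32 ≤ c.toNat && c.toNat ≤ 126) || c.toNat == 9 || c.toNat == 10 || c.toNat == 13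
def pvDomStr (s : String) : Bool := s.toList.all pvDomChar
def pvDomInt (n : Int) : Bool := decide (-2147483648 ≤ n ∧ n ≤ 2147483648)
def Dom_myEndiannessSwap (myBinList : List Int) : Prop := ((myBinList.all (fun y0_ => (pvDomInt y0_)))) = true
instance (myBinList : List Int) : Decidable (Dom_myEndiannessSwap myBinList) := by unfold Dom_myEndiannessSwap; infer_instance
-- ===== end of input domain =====

-- B does the same 8-byte-block reversal in one flat index-arithmetic pass, avoiding A's
-- chunk list built by repeated list concatenation (faster in a timing run's mechanism: no quadratic copying).

-- ===== PORT A =====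
def chunkList (myList : List Int) (chunkSize : Int) : List (List Int) :=
  (PySem.List.pyRange 0 (myList.length : Int) chunkSize).foldl
    (fun chunks i => chunks ++ [PySem.List.slice myList (some i) (some (i + chunkSize))]) []

def myEndiannessSwap (myBinList : List Int) : List Int :=
  let chunks := chunkList myBinList 8
  chunks.foldl (fun ret chunk => ret ++ ((PySem.List.slice? chunk none none (-1)).getD [])) []

-- ===== PORT B =====
def myEndiannessSwap_alt (myBinList : List Int) : List Int :=
  let n : Int := myBinList.length
  (PySem.List.pyRange 0 n 1).foldl
    (fun out i =>
      let start := (PySem.Int.floordiv i 8) * 8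
      let blockLen := min 8 (n - start)
      out ++ [PySem.List.pyGetD myBinList (start + blockLen - 1 - (i - start)) 0]) []

-- ===== PRECONDITION & SPEC =====
def Spec_myEndiannessSwap (myBinList : List Int) (out : List Int) : Prop := out = myEndiannessSwap_alt myBinList
instance (myBinList : List Int) (out : List Int) : Decidable (Spec_myEndiannessSwap myBinList out) := by unfold Spec_myEndiannessSwap; infer_instance

-- ===== CLAIM (what is proved, stated in full; the proofs are below) =====
def Claim_equal_myEndiannessSwap : Prop := ∀ (myBinList : List Int), Dom_myEndiannessSwap myBinList → Spec_myEndiannessSwap myBinList (myEndiannessSwap myBinList)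

-- ===== LEMMAS AND PROOFS =====

-- the element B writes at (nat) output position k
def pvF (xs : List Int) (k : Nat) : Int :=
  let s := 8 * (k / 8)
  xs.getD (s + min 8 (xs.length - s) - 1 - (k - s)) 0

lemma B_eq_map (xs : List Int) :
    myEndiannessSwap_alt xs = (List.range xs.length).map (pvF xs) := by
  unfold myEndiannessSwap_alt
  dsimp only
  rw [show ((0 : Int)) = ((0 : Nat) : Int) from rfl]
  rw [PySem.List.pyRange_one]
  rw [PySem.List.foldl_append_singleton_eq_map]
  simp only [List.nil_append, List.map_map]
  rw [show (((xs.length : Int)) - ((0:Nat):Int)).toNat = xs.length by omega]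
  apply List.map_congr_left
  intro k hk
  rw [List.mem_range] at hk
  simp only [Function.comp, pvF]
  have h8 : PySem.Int.floordiv (((0:Nat):Int) + (k:Int)) 8 = ((k / 8 : Nat) : Int) := by
    rw [show (((0:Nat):Int) + (k:Int)) = ((k:Nat):Int) by push_cast; ring]
    exact_mod_cast PySem.Int.floordiv_natCast k 8
  rw [h8]
  have hidx : ((k / 8 : Nat) : Int) * 8 + min 8 ((xs.length : Int) - ((k / 8 : Nat) : Int) * 8) - 1 -
      ((((0:Nat):Int) + (k:Int)) - ((k / 8 : Nat) : Int) * 8)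
      = ((8 * (k / 8) + min 8 (xs.length - 8 * (k / 8)) - 1 - (k - 8 * (k / 8)) : Nat) : Int) := by
    push_cast; omega
  rw [hidx, PySem.List.pyGetD_natCast]
  norm_num

lemma pvF_first (xs : List Int) :
    (xs.take 8).reverse = (List.range (min 8 xs.length)).map (pvF xs) := by
  apply List.ext_getElem
  · simp
  · intro j h1 h2
    have hj : j < min 8 xs.length := by simpa using h2
    have hjn : j < xs.length := by omega
    rw [List.getElem_reverse, List.getElem_map, List.getElem_range]
    simp only [pvF]
    rw [Nat.div_eq_of_lt (by omega : j < 8)]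
    have hidx : min 8 xs.length - 1 - j < xs.length := by omega
    rw [List.getD_eq_getElem xs 0 (by simpa using hidx)]
    rw [List.getElem_take]
    congr 1
    simp only [Nat.mul_zero, Nat.sub_zero, List.length_take]
    omega

lemma chunks_eq_map (xs : List Int) :
    ((List.range ((xs.length + 7)/8)).map (fun c => ((xs.drop (8*c)).take 8).reverse)).flatten
      = (List.range xs.length).map (pvF xs) := by
  by_cases h : xs = []
  · subst h; rfl
  · have hn : 0 < xs.length := List.length_pos_iff.mpr h
    have IH := chunks_eq_map (xs.drop 8)
    rw [show (xs.length + 7)/8 = ((xs.drop 8).length + 7)/8 + 1 by simp; omega,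
        List.range_succ_eq_map]
    simp only [List.map_cons, List.flatten_cons, List.map_map]
    have hshift : (fun c => ((xs.drop (8*c)).take 8).reverse) ∘ Nat.succ
        = fun c => (((xs.drop 8).drop (8*c)).take 8).reverse := by
      funext c
      simp only [Function.comp, List.drop_drop]
      congr 3
      omega
    rw [hshift, IH, Nat.mul_zero, List.drop_zero]
    rw [show xs.length = min 8 xs.length + ((xs.drop 8).length) by simp; omega,
        List.range_add, List.map_append]
    congr 1
    · exact pvF_first xs
    · by_cases h8 : xs.length ≤ 8
      · have : (xs.drop 8).length = 0 := by simp; omega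
        rw [this]; rfl
      · rw [List.map_map]
        apply List.map_congr_left
        intro k hk
        rw [List.mem_range] at hk
        simp only [Function.comp]
        have hmin : min 8 xs.length = 8 := by omega
        rw [hmin]
        have hgd : ∀ i : Nat, (xs.drop 8).getD i 0 = xs.getD (8+i) 0 := by
          intro i; simp [List.getD, List.getElem?_drop]
        simp only [pvF, hgd, List.length_drop]
        have hdiv : (8 + k) / 8 = 1 + k / 8 := by omega
        have hle : 8 * (k / 8) ≤ k := by
          calc 8 * (k / 8) = k / 8 * 8 := by ring
          _ ≤ k := Nat.div_mul_le_self k 8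
        rw [hdiv]
        simp only [List.length_drop] at hk ⊢
        congr 1
        omega
termination_by xs.length
decreasing_by simp; omega

lemma A_eq_chunks (xs : List Int) :
    myEndiannessSwap xs
      = ((List.range ((xs.length + 7)/8)).map (fun c => ((xs.drop (8*c)).take 8).reverse)).flatten := by
  unfold myEndiannessSwap chunkList
  dsimp only
  rw [PySem.List.foldl_append_singleton_eq_map]
  rw [PySem.List.foldl_append_eq_flatMap]
  simp only [List.nil_append, PySem.List.slice?_none_none_neg_one, Option.getD_some,
    List.flatMap_map, PySem.List.pyRange_of_pos 0 (xs.length : Int) (by norm_num : (0:Int) < 8)]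
  rw [show (if (0:Int) < (xs.length : Int) then (((xs.length : Int) - 0 + 8 - 1) / 8).toNat else 0)
        = (xs.length + 7)/8 by split_ifs with h <;> omega]
  rw [List.flatMap_def]
  congr 1
  apply List.map_congr_left
  intro c _
  have h1 : (0 : Int) + 8 * (c : Nat) = ((8*c : Nat) : Int) := by push_cast; ring
  have h2 : ((8*c : Nat) : Int) + 8 = ((8*c : Nat) : Int) + ((8 : Nat) : Int) := by norm_num
  rw [h1, h2, PySem.List.slice_natCast_add]

-- ===== VERDICT (by name: the statement is the Claim_ definition above) =====
theorem myEndiannessSwap_spec : Claim_equal_myEndiannessSwap := by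
  intro xs _
  unfold Spec_myEndiannessSwap
  rw [B_eq_map, A_eq_chunks, chunks_eq_map]
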